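-- pv_equiv track=rewrite | github.com/aldrineeinsteen/affiliate-junction-vm-labs | web/presto_wrapper.py | _format_presto_query
-- ===== SOURCE A (Python) =====
-- from typing import Dict, List, Optional, Any, Union
--
-- def _format_presto_query(query: str, parameters: List) -> str:
--     """
--     Format a Presto query with parameters
--
--     Since Presto doesn't use ? placeholders like Cassandra, we need to format the query
--     This is a simple implementation - in production, you'd want more robust parameter handling
--
--     Args:
--         query: Query string with placeholders
--         parameters: List of parameter values
--
--     Returns:
--         Formatted query string
--     """
--     formatted_query = query
--
--     # Replace ? placeholders with actual values
--     for param in parameters: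
--         if isinstance(param, str):
--             # Escape single quotes in strings and wrap in quotes
--             escaped_param = "'" + param.replace("'", "''") + "'"
--         elif param is None:
--             escaped_param = "NULL"
--         else:
--             escaped_param = str(param)
--
--         # Replace the first occurrence of ?
--         formatted_query = formatted_query.replace('?', escaped_param, 1)
--
--     return formatted_query
-- ===== SOURCE B (Python) =====
-- def _format_presto_query(query, parameters):
--     """Format a Presto query: substitute each ? placeholder, left to right,
--     with the corresponding escaped parameter value in a single pass."""
--     out = []
--     nxt = 0
--     for ch in query:
--         if ch == '?' and nxt < len(parameters):
--             p = parameters[nxt]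
--             nxt += 1
--             if isinstance(p, str):
--                 out.append("'" + p.replace("'", "''") + "'")
--             elif p is None:
--                 out.append("NULL")
--             else:
--                 out.append(str(p))
--         else:
--             out.append(ch)
--     return ''.join(out)
-- ===== Notes on version B (the rewrite author's own statement) =====
-- stated objective: faster
-- what changed: Replaces A's one full-string str.replace('?', v, 1) per parameter with a single left-to-right pass over the query that substitutes each placeholder with the matching escaped parameter and never rescans inserted text.
-- intended difference: When a parameter containing '?' is substituted into a remaining placeholder while later parameters are still pending, A feeds that '?' inside the already-quoted value to the next parameter (e.g. '??' with ['a?','b'] gives "'a'b''?"), while B leaves inserted values intact ("'a?''b'"), which is the intended reading of parameter substitution. — e.g. on _format_presto_query("??", ["a?", "b"]): A returns "'a'b''?", B returns "'a?''b'"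
import Mathlib
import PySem

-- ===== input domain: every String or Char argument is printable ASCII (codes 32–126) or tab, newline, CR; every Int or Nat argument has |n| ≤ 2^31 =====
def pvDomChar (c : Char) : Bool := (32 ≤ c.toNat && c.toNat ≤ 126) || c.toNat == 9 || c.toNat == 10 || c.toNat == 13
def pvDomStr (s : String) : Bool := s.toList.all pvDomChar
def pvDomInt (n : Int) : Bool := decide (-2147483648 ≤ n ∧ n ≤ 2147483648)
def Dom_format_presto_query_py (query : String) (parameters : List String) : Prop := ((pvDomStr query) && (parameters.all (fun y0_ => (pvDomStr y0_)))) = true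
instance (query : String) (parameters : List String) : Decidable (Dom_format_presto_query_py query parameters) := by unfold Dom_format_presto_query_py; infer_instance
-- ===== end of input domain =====

-- B substitutes each '?' placeholder in one left-to-right pass (never rescanning
-- substituted text), instead of A's one full-string .replace('?', v, 1) per parameter.

-- ===== PORT A =====
-- s.replace('?', new, 1) on char lists (first-occurrence replace, ported by hand:
-- copies until the first '?', substitutes `new` there, keeps the rest unchanged).
def pvReplaceFirstQ (s : List Char) (new : List Char) : List Char :=
  match s with
  | [] => []
  | c :: cs => if c = '?' then new ++ cs else c :: pvReplaceFirstQ cs new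

-- "'" + param.replace("'", "''") + "'"  (parameters : List String, so only the
-- isinstance(param, str) branch is reachable; exact via PySem.Chars.replace).
def pvEscape (p : String) : List Char :=
  '\'' :: (PySem.Chars.replace p.toList ['\''] ['\'', '\'']) ++ ['\'']

def format_presto_query_py (query : String) (parameters : List String) : String :=
  String.ofList (parameters.foldl (fun s p => pvReplaceFirstQ s (pvEscape p)) query.toList)

-- ===== PORT B =====
-- the for-loop of Source B: walk the query once; `ps` is the suffix of parameters not
-- yet consumed (parameters[nxt:]); a '?' takes the next parameter if any is left.
def pvScanB : List Char → List String → List Char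
  | [], _ => []
  | c :: cs, ps =>
    if c = '?' then
      match ps with
      | p :: ps' => pvEscape p ++ pvScanB cs ps'
      | [] => '?' :: pvScanB cs []
    else c :: pvScanB cs ps

def format_presto_query_py_alt (query : String) (parameters : List String) : String :=
  String.ofList (pvScanB query.toList parameters)

-- ===== PRECONDITION & SPEC =====
-- When a parameter that still has a later parameter behind it is substituted into a
-- remaining placeholder and itself contains '?', A feeds that '?' to the next
-- parameter (text from inside an already-inserted, quoted value is treated as a
-- placeholder), while B leaves inserted values intact; B's is the intended reading
-- of parameter substitution.
def D_format_presto_query_py (query : String) (parameters : List String) : Prop :=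
  ∃ p ∈ parameters.take (min (parameters.length - 1) (query.toList.count '?')), '?' ∈ p.toList
instance (query : String) (parameters : List String) : Decidable (D_format_presto_query_py query parameters) := by unfold D_format_presto_query_py; infer_instance

def Spec_format_presto_query_py (query : String) (parameters : List String) (out : String) : Prop := ¬ D_format_presto_query_py query parameters → out = format_presto_query_py_alt query parameters
instance (query : String) (parameters : List String) (out : String) : Decidable (Spec_format_presto_query_py query parameters out) := by unfold Spec_format_presto_query_py; infer_instance

def pvDiffWitness_format_presto_query_py : String × List String := ("??", ["a?", "b"])
def pvDiffWitnessOut_format_presto_query_py : String × String := ("'a'b''?", "'a?''b'")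

-- ===== CLAIM (what is proved, stated in full; the proofs are below) =====
def Claim_unchanged_format_presto_query_py : Prop := ∀ (query : String) (parameters : List String), Dom_format_presto_query_py query parameters → Spec_format_presto_query_py query parameters (format_presto_query_py query parameters)
def Claim_changed_format_presto_query_py : Prop := Dom_format_presto_query_py (pvDiffWitness_format_presto_query_py.1) (pvDiffWitness_format_presto_query_py.2) ∧ D_format_presto_query_py (pvDiffWitness_format_presto_query_py.1) (pvDiffWitness_format_presto_query_py.2) ∧ format_presto_query_py (pvDiffWitness_format_presto_query_py.1) (pvDiffWitness_format_presto_query_py.2) = pvDiffWitnessOut_format_presto_query_py.1 ∧ format_presto_query_py_alt (pvDiffWitness_format_presto_query_py.1) (pvDiffWitness_format_presto_query_py.2) = pvDiffWitnessOut_format_presto_query_py.2 ∧ pvDiffWitnessOut_format_presto_query_py.1 ≠ pvDiffWitnessOut_format_presto_query_py.2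

def Claim_exact_format_presto_query_py : Prop := ∀ (query : String) (parameters : List String), Dom_format_presto_query_py query parameters → D_format_presto_query_py query parameters → format_presto_query_py query parameters ≠ format_presto_query_py_alt query parameters

-- ===== LEMMAS AND PROOFS =====
-- single-quote escaping, characterised per character
def pvEscChar (c : Char) : List Char := if c = '\'' then ['\'', '\''] else [c]

theorem pvReplaceGo_quote (l : List Char) : ∀ (fuel : Nat) (acc : List Char), l.length ≤ fuel →
    PySem.Chars.replace.go ['\''] ['\'', '\''] fuel l acc = acc.reverse ++ l.flatMap pvEscChar := by
  induction l with
  | nil => intro fuel acc _; cases fuel <;> simp [PySem.Chars.replace.go]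
  | cons c cs ih =>
    intro fuel acc hle
    cases fuel with
    | zero => simp at hle
    | succ n =>
      rw [PySem.Chars.replace.go]
      by_cases hc : c = '\''
      · subst hc
        have hpre : List.isPrefixOf ['\''] ('\'' :: cs) = true := by simp [List.isPrefixOf]
        rw [if_pos hpre,
          show List.drop (['\''] : List Char).length ('\'' :: cs) = cs from rfl,
          show (['\'', '\''] : List Char).reverse ++ acc = '\'' :: '\'' :: acc from rfl,
          ih n _ (by simpa using Nat.le_of_succ_le_succ hle)]
        simp [pvEscChar]
      · have hpre : List.isPrefixOf ['\''] (c :: cs) = false := by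
          simp [List.isPrefixOf]
          exact fun h => hc h.symm
        rw [if_neg (by simp [hpre]), ih n _ (by simpa using Nat.le_of_succ_le_succ hle)]
        simp [pvEscChar, hc]

theorem pvReplace_quote (l : List Char) :
    PySem.Chars.replace l ['\''] ['\'', '\''] = l.flatMap pvEscChar := by
  rw [PySem.Chars.replace]
  simp only [List.isEmpty_cons, Bool.false_eq_true, if_neg, not_false_iff]
  simpa using pvReplaceGo_quote l l.length [] le_rfl

theorem pvEscape_noQ {p : String} (hp : '?' ∉ p.toList) : '?' ∉ pvEscape p := by
  intro hmem
  simp only [pvEscape, pvReplace_quote, List.mem_cons, List.mem_append,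
    List.mem_flatMap] at hmem
  rcases hmem with (h | ⟨c, hc, hin⟩) | h
  · exact absurd h (by decide)
  · by_cases hq : c = '\''
    · simp [pvEscChar, hq] at hin
    · simp only [pvEscChar, if_neg hq, List.mem_singleton] at hin
      exact hp (hin ▸ hc)
  · exact absurd h (by decide)

theorem pvSplit_of_mem {s : List Char} (h : '?' ∈ s) :
    ∃ u v, s = u ++ '?' :: v ∧ '?' ∉ u := by
  induction s with
  | nil => simp at h
  | cons c cs ih =>
    by_cases hc : c = '?'
    · exact ⟨[], cs, by simp [hc], by simp⟩
    · have hcs : '?' ∈ cs := by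
        rcases List.mem_cons.mp h with h1 | h1
        · exact absurd h1.symm hc
        · exact h1
      obtain ⟨u, v, huv, hu⟩ := ih hcs
      refine ⟨c :: u, v, by simp [huv], ?_⟩
      simp only [List.mem_cons, not_or]
      exact ⟨fun h => hc h.symm, hu⟩

theorem pvReplaceFirstQ_of_not_mem {s : List Char} (h : '?' ∉ s) (x : List Char) :
    pvReplaceFirstQ s x = s := by
  induction s with
  | nil => rfl
  | cons c cs ih =>
    simp only [List.mem_cons, not_or] at h
    simp only [pvReplaceFirstQ]
    rw [if_neg (fun hc => h.1 hc.symm), ih h.2]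

theorem pvReplaceFirstQ_append {u : List Char} (hu : '?' ∉ u) (v x : List Char) :
    pvReplaceFirstQ (u ++ '?' :: v) x = u ++ (x ++ v) := by
  induction u with
  | nil => simp [pvReplaceFirstQ]
  | cons c cs ih =>
    simp only [List.mem_cons, not_or] at hu
    simp only [List.cons_append, pvReplaceFirstQ]
    rw [if_neg (fun hc => hu.1 hc.symm), ih hu.2]

theorem pvScanB_nil_params (s : List Char) : pvScanB s [] = s := by
  induction s with
  | nil => rfl
  | cons c cs ih => by_cases hc : c = '?' <;> simp [pvScanB, hc, ih]

theorem pvScanB_of_not_mem {s : List Char} (h : '?' ∉ s) (ps : List String) :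
    pvScanB s ps = s := by
  induction s with
  | nil => rfl
  | cons c cs ih =>
    simp only [List.mem_cons, not_or] at h
    simp only [pvScanB]
    rw [if_neg (fun hc => h.1 hc.symm), ih h.2]

theorem pvScanB_append {u : List Char} (hu : '?' ∉ u) (t : List Char) (ps : List String) :
    pvScanB (u ++ t) ps = u ++ pvScanB t ps := by
  induction u with
  | nil => simp
  | cons c cs ih =>
    simp only [List.mem_cons, not_or] at hu
    simp only [List.cons_append, pvScanB]
    rw [if_neg (fun hc => hu.1 hc.symm), ih hu.2]

theorem pvMain : ∀ (ps : List String) (s : List Char),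
    (∀ i, i + 1 < ps.length → i < s.count '?' → '?' ∉ (ps.getD i "").toList) →
    ps.foldl (fun s p => pvReplaceFirstQ s (pvEscape p)) s = pvScanB s ps := by
  intro ps
  induction ps with
  | nil => intro s _; simp [pvScanB_nil_params]
  | cons p ps' ih =>
    intro s H
    by_cases hq : '?' ∈ s
    · obtain ⟨u, v, hs, hu⟩ := pvSplit_of_mem hq
      subst hs
      cases ps' with
      | nil =>
        simp only [List.foldl_cons, List.foldl_nil]
        rw [pvReplaceFirstQ_append hu, pvScanB_append hu]
        simp [pvScanB, pvScanB_nil_params]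
      | cons q rest =>
        have hcount : 0 < List.count '?' (u ++ '?' :: v) := by simp [List.count_append]
        have hp : '?' ∉ p.toList := by
          have := H 0 (by simp) hcount
          simpa using this
        have hesc : '?' ∉ pvEscape p := pvEscape_noQ hp
        rw [List.foldl_cons, pvReplaceFirstQ_append hu, ih (u ++ (pvEscape p ++ v)) ?_]
        · rw [pvScanB_append hu, pvScanB_append hesc, pvScanB_append hu]
          simp [pvScanB]
        · intro i hi hcnt
          have hcv : List.count '?' (u ++ (pvEscape p ++ v)) = List.count '?' v := by
            simp [List.count_append, List.count_eq_zero.mpr hu, List.count_eq_zero.mpr hesc]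
          have hcs : List.count '?' (u ++ '?' :: v) = List.count '?' v + 1 := by
            simp [List.count_append, List.count_eq_zero.mpr hu]
          have := H (i + 1) (by simpa using Nat.succ_lt_succ hi)
            (by rw [hcs]; rw [hcv] at hcnt; omega)
          simpa using this
    · simp only [List.foldl_cons]
      rw [pvReplaceFirstQ_of_not_mem hq, ih s ?_]
      · rw [pvScanB_of_not_mem hq, pvScanB_of_not_mem hq]
      · intro i _ hcnt
        rw [List.count_eq_zero.mpr hq] at hcnt
        exact absurd hcnt (Nat.not_lt_zero i)

-- ===== VERDICT (by name: the statement is the Claim_ definition above) =====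
theorem format_presto_query_py_spec : Claim_unchanged_format_presto_query_py := by
  intro query parameters _ hnd
  unfold D_format_presto_query_py at hnd
  push_neg at hnd
  unfold format_presto_query_py format_presto_query_py_alt
  congr 1
  apply pvMain
  intro i hi hcnt
  have hlen : i < parameters.length := by omega
  have hm : i < min (parameters.length - 1) (query.toList.count '?') := by omega
  have h2 : i < (parameters.take (min (parameters.length - 1) (query.toList.count '?'))).length := by
    simp; omega
  have hmem := List.getElem_mem h2
  rw [List.getElem_take] at hmem
  rw [List.getD_eq_getElem _ _ hlen]
  exact hnd _ hmem

theorem format_presto_query_py_changed : Claim_changed_format_presto_query_py := by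
  unfold Claim_changed_format_presto_query_py; decide

theorem pvEscape_memQ {p : String} (hp : '?' ∈ p.toList) : '?' ∈ pvEscape p := by
  simp only [pvEscape, pvReplace_quote, List.mem_cons, List.mem_append, List.mem_flatMap]
  exact Or.inl (Or.inr ⟨'?', hp, by simp [pvEscChar]⟩)

theorem pvFoldKeep (a : List Char) (d : Char) (ha : '?' ∉ a) (hd : d ≠ '?') :
    ∀ (ps : List String) (t : List Char), ∃ tail,
      ps.foldl (fun s p => pvReplaceFirstQ s (pvEscape p)) (a ++ d :: t) = a ++ d :: tail := by
  intro ps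
  induction ps with
  | nil => exact fun t => ⟨t, rfl⟩
  | cons p ps' ih =>
    intro t
    rw [List.foldl_cons]
    by_cases hq : '?' ∈ t
    · obtain ⟨a2, b2, ht, ha2⟩ := pvSplit_of_mem hq
      subst ht
      have hnm : '?' ∉ a ++ d :: a2 := by
        simp only [List.mem_append, List.mem_cons, not_or]
        exact ⟨ha, fun h => hd h.symm, ha2⟩
      rw [show a ++ d :: (a2 ++ '?' :: b2) = (a ++ d :: a2) ++ '?' :: b2 by simp,
        pvReplaceFirstQ_append hnm,
        show (a ++ d :: a2) ++ (pvEscape p ++ b2) = a ++ d :: (a2 ++ (pvEscape p ++ b2)) by simp]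
      exact ih _
    · have hnm : '?' ∉ a ++ d :: t := by
        simp only [List.mem_append, List.mem_cons, not_or]
        exact ⟨ha, fun h => hd h.symm, hq⟩
      rw [pvReplaceFirstQ_of_not_mem hnm]
      exact ih t

theorem pvMainNeq : ∀ (ps : List String) (s : List Char),
    (∃ i, i + 1 < ps.length ∧ i < List.count '?' s ∧ '?' ∈ (ps.getD i "").toList) →
    ps.foldl (fun s p => pvReplaceFirstQ s (pvEscape p)) s ≠ pvScanB s ps := by
  intro ps
  induction ps with
  | nil => intro s ⟨i, hi, _, _⟩; simp at hi
  | cons p ps' ih =>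
    intro s ⟨i, hi, hcnt, hqi⟩
    have hmem_s : '?' ∈ s := List.count_pos_iff.mp (by omega)
    obtain ⟨u, v, hs, hu⟩ := pvSplit_of_mem hmem_s
    subst hs
    by_cases hp : '?' ∈ p.toList
    · obtain ⟨q, rest, hps⟩ : ∃ q rest, ps' = q :: rest := by
        cases ps' with
        | nil => simp at hi
        | cons q rest => exact ⟨q, rest, rfl⟩
      subst hps
      obtain ⟨e1, e2, he, he1⟩ := pvSplit_of_mem (pvEscape_memQ hp)
      have hu1 : '?' ∉ u ++ e1 := by
        simp only [List.mem_append, not_or]; exact ⟨hu, he1⟩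
      rw [List.foldl_cons, pvReplaceFirstQ_append hu, List.foldl_cons, he,
        show u ++ ((e1 ++ '?' :: e2) ++ v) = (u ++ e1) ++ '?' :: (e2 ++ v) by simp,
        pvReplaceFirstQ_append hu1,
        show pvEscape q ++ (e2 ++ v)
          = '\'' :: ((PySem.Chars.replace q.toList ['\''] ['\'', '\''] ++ ['\'']) ++ (e2 ++ v))
          from by simp [pvEscape]]
      obtain ⟨tail, htail⟩ := pvFoldKeep (u ++ e1) '\'' hu1 (by decide) rest _
      rw [htail]
      rw [pvScanB_append hu,
        show pvScanB ('?' :: v) (p :: q :: rest) = pvEscape p ++ pvScanB v (q :: rest) from by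
          simp [pvScanB], he,
        show u ++ ((e1 ++ '?' :: e2) ++ pvScanB v (q :: rest))
          = (u ++ e1) ++ '?' :: (e2 ++ pvScanB v (q :: rest)) by simp]
      intro hEq
      have := List.append_cancel_left hEq
      simp at this
    · have hi0 : i ≠ 0 := by
        intro h; subst h; exact hp (by simpa using hqi)
      obtain ⟨j, rfl⟩ : ∃ j, i = j + 1 := ⟨i - 1, by omega⟩
      have hescp : '?' ∉ pvEscape p := pvEscape_noQ hp
      rw [List.foldl_cons, pvReplaceFirstQ_append hu,
        pvScanB_append hu,
        show pvScanB ('?' :: v) (p :: ps') = pvEscape p ++ pvScanB v ps' from by simp [pvScanB],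
        show u ++ (pvEscape p ++ pvScanB v ps') = (u ++ pvEscape p) ++ pvScanB v ps' by simp,
        show (u ++ pvEscape p) ++ pvScanB v ps'
          = pvScanB ((u ++ pvEscape p) ++ v) ps' from by
          rw [pvScanB_append (by simp only [List.mem_append, not_or]; exact ⟨hu, hescp⟩)],
        show u ++ (pvEscape p ++ v) = (u ++ pvEscape p) ++ v by simp]
      apply ih
      refine ⟨j, by simpa using hi, ?_, by simpa using hqi⟩
      have hcv : List.count '?' ((u ++ pvEscape p) ++ v) = List.count '?' v := by
        simp [List.count_append, List.count_eq_zero.mpr hu, List.count_eq_zero.mpr hescp]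
      have hcs : List.count '?' (u ++ '?' :: v) = List.count '?' v + 1 := by
        simp [List.count_append, List.count_eq_zero.mpr hu]
      rw [hcv]; rw [hcs] at hcnt; omega

theorem format_presto_query_py_tight : Claim_exact_format_presto_query_py := by
  intro query parameters _ hd
  unfold D_format_presto_query_py at hd
  obtain ⟨p, hmem, hq⟩ := hd
  obtain ⟨i, hilt, hget⟩ := List.mem_iff_getElem.mp hmem
  have hmin : i < min (parameters.length - 1) (query.toList.count '?') := by
    simpa using hilt
  have hlen : i < parameters.length := by omega
  intro hEq
  have hlists := congrArg String.toList hEq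
  simp only [format_presto_query_py, format_presto_query_py_alt] at hlists
  have hl : parameters.foldl (fun s p => pvReplaceFirstQ s (pvEscape p)) query.toList
      = pvScanB query.toList parameters := by
    simpa using hlists
  refine pvMainNeq parameters query.toList ⟨i, by omega, by omega, ?_⟩ hl
  rw [List.getD_eq_getElem _ _ hlen]
  rw [List.getElem_take] at hget
  exact hget ▸ hq
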